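-- pv_equiv track=rewrite | github.com/manwar/perlweeklychallenge-club | challenge-153/roger-bell-west/python/ch-1.py | leftfactorial
-- ===== SOURCE A (Python) =====
-- def leftfactorial(mx):
--   out=[]
--   fact=1
--   sm=0
--   for i in range(mx):
--     if i > 0:
--       fact *= i
--     sm += fact
--     out.append(sm)
--   return out
-- ===== SOURCE B (Python) =====
-- def _fact(n):
--     p = 1
--     for k in range(1, n + 1):
--         p *= k
--     return p
--
-- def leftfactorial(mx):
--     out = []
--     total = 0
--     for f in [_fact(i) for i in range(mx)]:
--         total += f
--         out.append(total)
--     return out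
-- ===== Notes on version B (the rewrite author's own statement) =====
-- stated objective: alternative
-- what changed: B computes each factorial independently with a product-loop helper and then takes a prefix-sum pass over that factorial table, instead of A's single loop fusing a running product with a running sum.
import Mathlib
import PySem

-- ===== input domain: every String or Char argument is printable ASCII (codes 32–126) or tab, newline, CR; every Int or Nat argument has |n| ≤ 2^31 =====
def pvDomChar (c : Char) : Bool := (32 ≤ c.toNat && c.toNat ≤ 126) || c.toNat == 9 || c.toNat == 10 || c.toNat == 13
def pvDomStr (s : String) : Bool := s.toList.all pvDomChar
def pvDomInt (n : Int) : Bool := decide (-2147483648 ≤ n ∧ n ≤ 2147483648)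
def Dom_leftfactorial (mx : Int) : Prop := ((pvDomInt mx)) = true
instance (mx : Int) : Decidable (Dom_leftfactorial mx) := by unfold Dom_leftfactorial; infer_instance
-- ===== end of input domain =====

-- B computes each factorial independently (product-loop helper) and prefix-sums that table,
-- instead of A's fused running-product/running-sum loop; alternative decomposition, same results.


-- ===== PORT A =====
-- literal port of A: one loop maintaining out, a running product fact and a running sum sm
def leftfactorial (mx : Int) : List Int :=
  ((PySem.List.pyRange 0 mx 1).foldl
    (fun (st : List Int × Int × Int) i =>
      let fact := if i > 0 then st.2.1 * i else st.2.1
      let sm := st.2.2 + fact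
      (st.1 ++ [sm], fact, sm))
    ([], 1, 0)).1

-- ===== PORT B =====
-- port of Source B's helper _fact: product over range(1, n+1)
def bfact (n : Int) : Int :=
  (PySem.List.pyRange 1 (n + 1) 1).foldl (fun p k => p * k) 1

-- port of B: build the factorial table, then a prefix-sum pass over it
def leftfactorial_alt (mx : Int) : List Int :=
  (((PySem.List.pyRange 0 mx 1).map bfact).foldl
    (fun (st : List Int × Int) f =>
      let total := st.2 + f
      (st.1 ++ [total], total))
    ([], 0)).1

-- ===== PRECONDITION & SPEC =====
def Spec_leftfactorial (mx : Int) (out : List Int) : Prop := out = leftfactorial_alt mx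
instance (mx : Int) (out : List Int) : Decidable (Spec_leftfactorial mx out) := by unfold Spec_leftfactorial; infer_instance

-- ===== CLAIM (what is proved, stated in full; the proofs are below) =====
def Claim_equal_leftfactorial : Prop := ∀ (mx : Int), Dom_leftfactorial mx → Spec_leftfactorial mx (leftfactorial mx)

-- ===== LEMMAS AND PROOFS =====

theorem bfact_natCast (n : Nat) : bfact (n : Int) = (Nat.factorial n : Int) := by
  induction n with
  | zero => simp [bfact, PySem.List.pyRange_one_eq_nil, Nat.factorial]
  | succ k ih =>
    have hc : ((k + 1 : Nat) : Int) + 1 = ((k : Int) + 1) + 1 := by push_cast; ring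
    have hsplit : PySem.List.pyRange 1 (((k : Int) + 1) + 1) 1
        = PySem.List.pyRange 1 ((k : Int) + 1) 1 ++ [(k : Int) + 1] :=
      PySem.List.pyRange_one_succ_right (by omega)
    unfold bfact
    rw [hc, hsplit, List.foldl_append]
    unfold bfact at ih
    have hck : ((k : Nat) : Int) + 1 = (k : Int) + 1 := rfl
    rw [hck] at ih
    rw [ih]
    simp [Nat.factorial_succ]
    ring

-- the reference values: prefix sums of factorials
def refSum : Nat → Int
  | 0 => 0
  | n + 1 => refSum n + (Nat.factorial n : Int)

def refOut : Nat → List Int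
  | 0 => []
  | n + 1 => refOut n ++ [refSum (n + 1)]

theorem foldA_range (n : Nat) :
    ((PySem.List.pyRange 0 (n : Int) 1).foldl
      (fun (st : List Int × Int × Int) i =>
        let fact := if i > 0 then st.2.1 * i else st.2.1
        let sm := st.2.2 + fact
        (st.1 ++ [sm], fact, sm))
      ([], 1, 0))
    = (refOut n, (Nat.factorial (n - 1) : Int), refSum n) := by
  induction n with
  | zero => simp [PySem.List.pyRange_one_eq_nil, refOut, refSum]
  | succ k ih =>
    have hsplit : PySem.List.pyRange 0 ((k : Int) + 1) 1
        = PySem.List.pyRange 0 (k : Int) 1 ++ [(k : Int)] :=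
      PySem.List.pyRange_one_succ_right (by positivity)
    have hc : ((k + 1 : Nat) : Int) = (k : Int) + 1 := by push_cast; ring
    rw [hc, hsplit, List.foldl_append, ih]
    simp only [List.foldl_cons, List.foldl_nil]
    rcases Nat.eq_zero_or_pos k with hk | hk
    · subst hk; simp [refOut, refSum, Nat.factorial]
    · have hpos : (0 : Int) < (k : Int) := by exact_mod_cast hk
      simp only [if_pos hpos]
      have hfact : (Nat.factorial (k - 1) : Int) * (k : Int) = (Nat.factorial k : Int) := by
        obtain ⟨m, rfl⟩ := Nat.exists_eq_add_of_lt hk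
        simp only [Nat.zero_add, Nat.add_sub_cancel]
        push_cast [Nat.factorial_succ]
        ring
      simp [hfact, refOut, refSum]

theorem foldB_range (n : Nat) :
    (((PySem.List.pyRange 0 (n : Int) 1).map bfact).foldl
      (fun (st : List Int × Int) f =>
        let total := st.2 + f
        (st.1 ++ [total], total))
      ([], 0))
    = (refOut n, refSum n) := by
  induction n with
  | zero => simp [PySem.List.pyRange_one_eq_nil, refOut, refSum]
  | succ k ih =>
    have hsplit : PySem.List.pyRange 0 ((k : Int) + 1) 1
        = PySem.List.pyRange 0 (k : Int) 1 ++ [(k : Int)] :=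
      PySem.List.pyRange_one_succ_right (by positivity)
    have hc : ((k + 1 : Nat) : Int) = (k : Int) + 1 := by push_cast; ring
    rw [hc, hsplit, List.map_append, List.foldl_append, ih]
    simp [bfact_natCast, refOut, refSum]

theorem range_cases (mx : Int) :
    leftfactorial mx = leftfactorial_alt mx := by
  by_cases h : mx ≤ 0
  · simp [leftfactorial, leftfactorial_alt, PySem.List.pyRange_one_eq_nil h]
  · have : mx = (mx.toNat : Int) := by omega
    rw [leftfactorial, leftfactorial_alt, this, foldA_range, foldB_range]

-- ===== VERDICT (by name: the statement is the Claim_ definition above) =====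
theorem leftfactorial_spec : Claim_equal_leftfactorial := by
  intro mx _
  exact range_cases mx
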